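-- pv_equiv track=rewrite | github.com/acybppres/Lothar | Collatz/kenglish/mrlattice.py | direct_0
-- ===== SOURCE A (Python) =====
-- def direct_0(a):
--     """
--     This function directly generates all integers of the given generation $a$
--     that have one zero in their label
--     """
--     if a < 4:
--         return []
--     #
--     collatzNums = []
--     if (a & 1) == 0:
--         i_0 = 0
--     else:
--         i_0 = 1
--     for c0 in range(i_0, a-3, 2):
--         n = (2**a  - 2**c0)//3
--         collatzNums.append(n)
--     return collatzNums
-- ===== SOURCE B (Python) =====
-- def direct_0(a):
--     """
--     This function directly generates all integers of the given generation $a$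
--     that have one zero in their label
--     """
--     if a < 4:
--         return []
--     i_0 = a % 2
--     steps = (a - 2 - i_0) // 2          # = len(range(i_0, a-3, 2))
--     collatzNums = []
--     p = 2 ** i_0                        # running 2**c0
--     n = (2 ** a - p) // 3               # running (2**a - 2**c0)//3; exact: a and c0 share parity
--     for _ in range(steps):
--         collatzNums.append(n)
--         n -= p                          # n(c0) - n(c0+2) = 2**c0
--         p *= 4
--     return collatzNums
-- ===== Notes on version B (the rewrite author's own statement) =====
-- stated objective: faster
-- what changed: B computes the bignum power and the exact division by three only once, then threads a running value that each loop step updates with a single subtraction (and a doubling-twice of the step term), instead of A recomputing a fresh bignum power and division inside every iteration.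
import Mathlib
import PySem

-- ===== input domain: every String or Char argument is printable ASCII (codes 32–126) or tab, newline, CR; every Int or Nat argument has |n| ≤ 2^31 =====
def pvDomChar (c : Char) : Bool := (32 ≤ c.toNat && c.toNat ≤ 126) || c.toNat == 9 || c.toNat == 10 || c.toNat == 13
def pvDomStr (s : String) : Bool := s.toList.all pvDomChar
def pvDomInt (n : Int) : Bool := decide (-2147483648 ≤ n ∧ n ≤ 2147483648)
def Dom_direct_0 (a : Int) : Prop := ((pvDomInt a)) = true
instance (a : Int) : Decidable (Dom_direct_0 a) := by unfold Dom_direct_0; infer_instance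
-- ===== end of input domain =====

-- B replaces A's per-step bignum power and division ((2**a - 2**c0)//3 recomputed each iteration)
-- by one division and a running accumulator updated with a subtraction (objective: faster, constant-factor).

-- ===== PORT A =====
def direct_0 (a : Int) : List Int :=
  if a < 4 then []
  else
    let i0 : Int := if PySem.Int.band a 1 == 0 then 0 else 1
    (PySem.List.pyRange i0 (a - 3) 2).foldl
      (fun acc c0 => acc ++ [PySem.Int.floordiv (2 ^ a.toNat - 2 ^ c0.toNat) 3]) []

-- ===== PORT B =====
-- the 'for _ in range(steps)' loop of Source B, counting down the remaining steps
def direct0AltLoop (p n : Int) : Nat → List Int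
  | 0 => []
  | Nat.succ k => n :: direct0AltLoop (p * 4) (n - p) k

def direct_0_alt (a : Int) : List Int :=
  if a < 4 then []
  else
    let i0 : Int := PySem.Int.mod a 2
    let steps : Int := PySem.Int.floordiv (a - 2 - i0) 2
    direct0AltLoop (2 ^ i0.toNat)
      (PySem.Int.floordiv (2 ^ a.toNat - 2 ^ i0.toNat) 3) steps.toNat

-- ===== PRECONDITION & SPEC =====
def Spec_direct_0 (a : Int) (out : List Int) : Prop := out = direct_0_alt a
instance (a : Int) (out : List Int) : Decidable (Spec_direct_0 a out) := by unfold Spec_direct_0; infer_instance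

-- ===== CLAIM (what is proved, stated in full; the proofs are below) =====
def Claim_equal_direct_0 : Prop := ∀ (a : Int), Dom_direct_0 a → Spec_direct_0 a (direct_0 a)

-- ===== LEMMAS AND PROOFS =====

lemma three_dvd_four_pow_sub_one (t : Nat) : (3:Int) ∣ 4 ^ t - 1 := by
  induction t with
  | zero => simp
  | succ t ih =>
    have h : (4:Int) ^ (t + 1) - 1 = 4 * (4 ^ t - 1) + 3 := by ring
    rw [h]
    exact dvd_add (Dvd.dvd.mul_left ih 4) ⟨1, by ring⟩

lemma three_dvd_pow_sub (c m : Nat) (h : c ≤ m) (hp : (m - c) % 2 = 0) :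
    (3:Int) ∣ 2 ^ m - 2 ^ c := by
  obtain ⟨t, ht⟩ : ∃ t, m = c + 2 * t := ⟨(m - c) / 2, by omega⟩
  subst ht
  have h1 : (3:Int) ∣ 4 ^ t - 1 := three_dvd_four_pow_sub_one t
  have h2 : (2:Int) ^ (c + 2 * t) - 2 ^ c = 2 ^ c * ((4:Int) ^ t - 1) := by
    rw [pow_add, pow_mul]; norm_num; ring
  rw [h2]
  exact Dvd.dvd.mul_left h1 _

lemma direct0AltLoop_eq (k : Nat) : ∀ (c : Nat) (X : Int), (3:Int) ∣ X - 2 ^ c →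
    direct0AltLoop (2 ^ c) ((X - 2 ^ c) / 3) k
      = (List.range k).map (fun j => (X - 2 ^ (c + 2 * j)) / 3) := by
  induction k with
  | zero => intro c X _; simp [direct0AltLoop]
  | succ k ih =>
    intro c X h
    obtain ⟨q, hq⟩ := h
    have h3 : (3:Int) ≠ 0 := by norm_num
    have hq' : (X - 2 ^ c) / 3 = q := by rw [hq]; exact Int.mul_ediv_cancel_left _ h3
    have h2 : X - 2 ^ (c + 2) = 3 * (q - 2 ^ c) := by
      have h4 : (2:Int) ^ (c + 2) = 4 * 2 ^ c := by ring
      rw [h4]; linarith [hq]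
    have hstep : (X - 2 ^ c) / 3 - 2 ^ c = (X - 2 ^ (c + 2)) / 3 := by
      rw [hq', h2, Int.mul_ediv_cancel_left _ h3]
    have hpow : (2:Int) ^ c * 4 = 2 ^ (c + 2) := by ring
    rw [direct0AltLoop, hpow, hstep, ih (c + 2) X ⟨q - 2 ^ c, h2⟩,
        List.range_succ_eq_map]
    simp only [List.map_cons, List.map_map, Nat.mul_zero, Nat.add_zero]
    congr 1
    apply List.map_congr_left
    intro j _
    have he : c + 2 + 2 * j = c + 2 * (j + 1) := by omega
    simp [Function.comp, he]

lemma direct_0_branch (m r : Nat) (a : Int) (hm : a = (m : Int)) (ha : 4 ≤ a)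
    (hr : r = m % 2) :
    (PySem.List.pyRange (r : Int) (a - 3) 2).foldl
        (fun acc c0 => acc ++ [PySem.Int.floordiv (2 ^ a.toNat - 2 ^ c0.toNat) 3]) []
      = direct0AltLoop (2 ^ ((r : Int)).toNat)
          (PySem.Int.floordiv (2 ^ a.toNat - 2 ^ ((r : Int)).toNat) 3)
          (PySem.Int.floordiv (a - 2 - (r : Int)) 2).toNat := by
  have hm4 : 4 ≤ m := by omega
  have har : (r : Int) < a - 3 := by rw [hm]; omega
  have hN : a - 3 - (r : Int) + 2 - 1 = a - 2 - (r : Int) := by ring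
  have htn : ((r : Int)).toNat = r := by omega
  have hat : a.toNat = m := by omega
  have hdvd : (3:Int) ∣ 2 ^ m - 2 ^ r :=
    three_dvd_pow_sub r m (by omega) (by omega)
  rw [PySem.List.foldl_append_singleton_eq_map,
      PySem.List.pyRange_of_pos _ _ (by norm_num : (0:Int) < 2),
      if_pos har, hN,
      PySem.Int.floordiv_eq_ediv_of_pos (by norm_num : (0:Int) < 3),
      PySem.Int.floordiv_eq_ediv_of_pos (by norm_num : (0:Int) < 2),
      htn, hat,
      direct0AltLoop_eq _ r _ hdvd]
  simp only [List.nil_append, List.map_map]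
  apply List.map_congr_left
  intro k _
  have hk : ((r : Int) + 2 * (k : Int)).toNat = r + 2 * k := by omega
  simp only [Function.comp_apply, hk,
    PySem.Int.floordiv_eq_ediv_of_pos (by norm_num : (0:Int) < 3)]

-- ===== VERDICT (by name: the statement is the Claim_ definition above) =====
theorem direct_0_spec : Claim_equal_direct_0 := by
  intro a _
  unfold Spec_direct_0 direct_0 direct_0_alt
  by_cases h4 : a < 4
  · simp [h4]
  · simp only [h4, if_false]
    have ha : 4 ≤ a := by omega
    obtain ⟨m, hm⟩ : ∃ m : Nat, a = (m : Int) := ⟨a.toNat, by omega⟩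
    have hmod : PySem.Int.mod a 2 = ((m % 2 : Nat) : Int) := by
      rw [hm]; exact_mod_cast PySem.Int.mod_natCast m 2
    have hi0 : (if PySem.Int.band a 1 == 0 then (0:Int) else 1) = ((m % 2 : Nat) : Int) := by
      rw [PySem.Int.band_one, hmod]
      rcases Nat.mod_two_eq_zero_or_one m with h | h <;> simp [h]
    rw [hi0, hmod]
    exact direct_0_branch m (m % 2) a hm ha rfl
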